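-- pv_equiv track=rewrite | github.com/Slothfulwave612/Coding-Problems | Coding Club Linkedin/05. 2D Sum/py_code.py | two_d_sum
-- ===== SOURCE A (Python) =====
-- def two_d_sum(mat):
--     '''
--     Returns the required sum.
--
--     Arguments:
--     mat -- a square matrix
--
--     Retuns:
--     summ -- required sum from the matrix
--     '''
--
--     length = len(mat)
--     summ = 0
--
--     for i in range(length):
--         for j in range(length):
--             if i == 0 or i == length - 1:
--                 summ += mat[i][j]
--
--             elif j == 0 or j == length - 1:
--                 summ += mat[i][j]
--
--             elif i == j:
--                 summ += mat[i][j]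
--
--     return summ
-- ===== SOURCE B (Python) =====
-- def two_d_sum(mat):
--     '''
--     Returns the required sum.
--
--     Arguments:
--     mat -- a square matrix
--
--     Retuns:
--     summ -- required sum from the matrix
--     '''
--     n = len(mat)
--     if n == 0:
--         return 0
--     total = sum(mat[0][:n])
--     if n > 1:
--         total += sum(mat[n - 1][:n])
--         for i in range(1, n - 1):
--             row = mat[i]
--             total += row[0] + row[n - 1] + row[i]
--     return total
-- ===== Notes on version B (the rewrite author's own statement) =====
-- stated objective: faster
-- what changed: A scans all n*n cells and tests each index pair; B sums the full first and last rows and, for each interior row, adds only its first, last and diagonal cells, one O(1) step per interior row after the two border-row sums.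
import Mathlib
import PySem

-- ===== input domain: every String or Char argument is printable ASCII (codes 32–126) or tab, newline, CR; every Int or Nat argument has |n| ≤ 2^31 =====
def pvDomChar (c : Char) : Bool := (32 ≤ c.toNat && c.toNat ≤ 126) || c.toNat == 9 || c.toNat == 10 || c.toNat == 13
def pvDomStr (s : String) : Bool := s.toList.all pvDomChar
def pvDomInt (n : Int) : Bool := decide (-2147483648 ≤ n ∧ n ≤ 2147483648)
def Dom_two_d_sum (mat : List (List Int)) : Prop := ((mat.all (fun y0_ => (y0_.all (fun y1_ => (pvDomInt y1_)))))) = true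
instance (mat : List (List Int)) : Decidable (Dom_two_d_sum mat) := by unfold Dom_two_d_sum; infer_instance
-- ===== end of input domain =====

-- B replaces A's scan of all n*n cells by a pass over the n rows: it sums the full
-- first and last rows and only the three relevant cells (first, last, diagonal) of
-- each interior row.

-- ===== PORT A =====
def two_d_sum (mat : List (List Int)) : Int :=
  let length : Int := mat.length
  (PySem.List.pyRange 0 length 1).foldl (fun summ i =>
    (PySem.List.pyRange 0 length 1).foldl (fun summ j =>
      if i = 0 ∨ i = length - 1 then
        summ + PySem.List.pyGetD (PySem.List.pyGetD mat i []) j 0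
      else if j = 0 ∨ j = length - 1 then
        summ + PySem.List.pyGetD (PySem.List.pyGetD mat i []) j 0
      else if i = j then
        summ + PySem.List.pyGetD (PySem.List.pyGetD mat i []) j 0
      else summ) summ) 0

-- ===== PORT B =====
def two_d_sum_alt (mat : List (List Int)) : Int :=
  let n : Int := mat.length
  if n = 0 then 0
  else
    let total : Int := (PySem.List.slice (PySem.List.pyGetD mat 0 []) none (some n)).sum
    if 1 < n then
      let total := total + (PySem.List.slice (PySem.List.pyGetD mat (n - 1) []) none (some n)).sum
      (PySem.List.pyRange 1 (n - 1) 1).foldl (fun total i =>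
        let row := PySem.List.pyGetD mat i []
        total + PySem.List.pyGetD row 0 0 + PySem.List.pyGetD row (n - 1) 0
              + PySem.List.pyGetD row i 0) total
    else total

-- ===== PRECONDITION & SPEC =====
-- A raises IndexError exactly when some row is shorter than the number of rows; those inputs are excluded.
def Pre_two_d_sum (mat : List (List Int)) : Prop := ∀ row ∈ mat, mat.length ≤ row.length
instance (mat : List (List Int)) : Decidable (Pre_two_d_sum mat) := by unfold Pre_two_d_sum; infer_instance
def pvWitness_two_d_sum : List (List Int) := [[1, 2], [3, 4]]
def Spec_two_d_sum (mat : List (List Int)) (out : Int) : Prop := out = two_d_sum_alt mat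
instance (mat : List (List Int)) (out : Int) : Decidable (Spec_two_d_sum mat out) := by unfold Spec_two_d_sum; infer_instance

-- ===== CLAIM (what is proved, stated in full; the proofs are below) =====
def Claim_equal_two_d_sum : Prop := ∀ (mat : List (List Int)), Dom_two_d_sum mat → Pre_two_d_sum mat → Spec_two_d_sum mat (two_d_sum mat)

-- ===== LEMMAS AND PROOFS =====

-- the (i,j) cell of mat, default 0 (what both ports read)
def pvR (mat : List (List Int)) (i j : Nat) : Int := (mat.getD i []).getD j 0

-- A's per-cell contribution
def pvT (mat : List (List Int)) (i j : Nat) : Int :=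
  if i = 0 ∨ i = mat.length - 1 then pvR mat i j
  else if j = 0 ∨ j = mat.length - 1 then pvR mat i j
  else if i = j then pvR mat i j
  else 0

lemma sum_map_range_eq_finset (n : Nat) (f : Nat → Int) :
    ((List.range n).map f).sum = ∑ i ∈ Finset.range n, f i := rfl

lemma foldl_of_step {G : Int → Nat → Int} {F : Nat → Int} (h : ∀ s i, G s i = s + F i)
    (l : List Nat) (a : Int) : l.foldl G a = a + (l.map F).sum := by
  rw [show G = fun s i => s + F i from funext fun s => funext fun i => h s i,
      PySem.List.foldl_add]

-- A's nested loops as a double finite sum over cell indices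
lemma A_as_sum (mat : List (List Int)) :
    two_d_sum mat = ∑ i ∈ Finset.range mat.length, ∑ j ∈ Finset.range mat.length, pvT mat i j := by
  rcases Nat.eq_zero_or_pos mat.length with h0 | hpos
  · rw [List.length_eq_zero_iff.mp h0]; rfl
  unfold two_d_sum
  simp only [PySem.List.pyRange_zero_nat, List.foldl_map]
  have hinner : ∀ (i : Nat) (s : Int),
      List.foldl (fun (summ : Int) (j : Nat) =>
        if (i : Int) = 0 ∨ (i : Int) = (mat.length : Int) - 1 then
          summ + PySem.List.pyGetD (PySem.List.pyGetD mat (i : Int) []) (j : Int) 0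
        else if (j : Int) = 0 ∨ (j : Int) = (mat.length : Int) - 1 then
          summ + PySem.List.pyGetD (PySem.List.pyGetD mat (i : Int) []) (j : Int) 0
        else if (i : Int) = (j : Int) then
          summ + PySem.List.pyGetD (PySem.List.pyGetD mat (i : Int) []) (j : Int) 0
        else summ) s (List.range mat.length)
      = s + ∑ j ∈ Finset.range mat.length, pvT mat i j := by
    intro i s
    rw [foldl_of_step (F := fun j => pvT mat i j) ?_, sum_map_range_eq_finset]
    intro s j
    unfold pvT pvR
    simp only [PySem.List.pyGetD_natCast]
    split_ifs <;> omega
  rw [foldl_of_step (F := fun i => ∑ j ∈ Finset.range mat.length, pvT mat i j)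
        (fun s i => hinner i s), zero_add, sum_map_range_eq_finset]

lemma sum_getD_take (row : List Int) (n : Nat) (h : n ≤ row.length) :
    ∑ j ∈ Finset.range n, row.getD j 0 = (row.take n).sum := by
  induction n with
  | zero => simp
  | succ m ih =>
    rw [Finset.sum_range_succ, ih (by omega),
        show row.getD m 0 = row[m] from List.getD_eq_getElem _ _ (by omega)]
    exact Eq.symm (List.sum_take_succ row m h)

-- a border row of A contributes its first mat.length entries
lemma sum_pvT_border (mat : List (List Int)) (i : Nat)
    (hi : i = 0 ∨ i = mat.length - 1) (hlen : mat.length ≤ (mat.getD i []).length) :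
    ∑ j ∈ Finset.range mat.length, pvT mat i j = ((mat.getD i []).take mat.length).sum := by
  rw [← sum_getD_take _ _ hlen]
  refine Finset.sum_congr rfl fun j hj => ?_
  simp [pvT, pvR, hi]

-- an interior row of A contributes its first, last and diagonal cells
lemma sum_pvT_interior (mat : List (List Int)) (i : Nat)
    (h1 : 1 ≤ i) (h2 : i < mat.length - 1) :
    ∑ j ∈ Finset.range mat.length, pvT mat i j
      = pvR mat i 0 + pvR mat i (mat.length - 1) + pvR mat i i := by
  have hn : 3 ≤ mat.length := by omega
  have hstep : ∀ j ∈ Finset.range mat.length, pvT mat i j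
      = (if j = 0 then pvR mat i j else 0) + (if j = mat.length - 1 then pvR mat i j else 0)
        + (if j = i then pvR mat i j else 0) := by
    intro j hj
    unfold pvT
    split_ifs <;> omega
  rw [Finset.sum_congr rfl hstep]
  simp only [Finset.sum_add_distrib, Finset.sum_ite_eq' (Finset.range mat.length)]
  simp only [Finset.mem_range]
  rw [if_pos (by omega), if_pos (by omega), if_pos (by omega)]

-- B as the same three-part sum (n ≥ 2)
lemma B_as_sum (mat : List (List Int)) (h2 : 2 ≤ mat.length) :
    two_d_sum_alt mat
      = ((mat.getD 0 []).take mat.length).sum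
        + ((mat.getD (mat.length - 1) []).take mat.length).sum
        + ∑ k ∈ Finset.range (mat.length - 2),
            (pvR mat (k + 1) 0 + pvR mat (k + 1) (mat.length - 1) + pvR mat (k + 1) (k + 1)) := by
  unfold two_d_sum_alt
  rw [if_neg (by omega : ¬ ((mat.length : Int) = 0)), if_pos (by omega : (1 : Int) < (mat.length : Int))]
  have hc : ((mat.length : Int) - 1) = ((mat.length - 1 : Nat) : Int) := by omega
  rw [hc]
  simp only [PySem.List.pyGetD_natCast, PySem.List.pyGetD_zero, PySem.List.slice_to_natCast]
  rw [show PySem.List.pyRange 1 ((mat.length - 1 : Nat) : Int) 1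
        = (List.range (mat.length - 2)).map (fun k => ((k + 1 : Nat) : Int)) from ?_]
  · rw [List.foldl_map]
    refine Eq.trans (foldl_of_step (F := fun k => pvR mat (k+1) 0
        + pvR mat (k+1) (mat.length - 1) + pvR mat (k+1) (k+1)) ?_ _ _) ?_
    · intro s k
      simp only [PySem.List.pyGetD_natCast]
      unfold pvR
      ring
    · rw [sum_map_range_eq_finset]
  · rw [PySem.List.pyRange_one]
    have he : (((mat.length - 1 : Nat) : Int) - 1).toNat = mat.length - 2 := by omega
    rw [he]
    apply List.map_congr_left
    intro k hk
    omega

lemma row_len (mat : List (List Int)) (i : Nat) (hi : i < mat.length) (hpre : Pre_two_d_sum mat) :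
    mat.length ≤ (mat.getD i []).length := by
  rw [List.getD_eq_getElem mat [] hi]
  exact hpre _ (List.getElem_mem hi)

-- ===== VERDICT (by name: the statement is the Claim_ definition above) =====
theorem two_d_sum_spec : Claim_equal_two_d_sum := by
  intro mat _ hpre
  unfold Spec_two_d_sum
  rcases Nat.lt_or_ge mat.length 2 with hlt | h2
  · rcases (by omega : mat.length = 0 ∨ mat.length = 1) with h0 | h1
    · rw [List.length_eq_zero_iff.mp h0]; rfl
    · rw [A_as_sum]
      unfold two_d_sum_alt
      rw [if_neg (by omega : ¬ ((mat.length : Int) = 0)),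
          if_neg (by omega : ¬ ((1 : Int) < (mat.length : Int)))]
      simp only [PySem.List.pyGetD_zero, PySem.List.slice_to_natCast]
      rw [h1, Finset.sum_range_one, Finset.sum_range_one]
      rw [show pvT mat 0 0 = pvR mat 0 0 from by unfold pvT; rw [if_pos (Or.inl rfl)]]
      rw [← sum_getD_take (mat.getD 0 []) 1 (by have := row_len mat 0 (by omega) hpre; omega),
          Finset.sum_range_one]
      rfl
  · rw [A_as_sum, B_as_sum mat h2]
    have hb0 := sum_pvT_border mat 0 (Or.inl rfl) (row_len mat 0 (by omega) hpre)
    have hb1 := sum_pvT_border mat (mat.length - 1) (Or.inr rfl)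
        (row_len mat (mat.length - 1) (by omega) hpre)
    obtain ⟨m, hm⟩ : ∃ m, mat.length = m + 2 := ⟨mat.length - 2, by omega⟩
    rw [hm] at hb0 hb1 ⊢
    simp only [Nat.add_sub_cancel, show m + 2 - 1 = m + 1 from rfl] at hb0 hb1 ⊢
    rw [Finset.sum_range_succ, Finset.sum_range_succ', hb0, hb1]
    have hint : ∀ k ∈ Finset.range m, (∑ j ∈ Finset.range (m + 2), pvT mat (k + 1) j)
        = pvR mat (k + 1) 0 + pvR mat (k + 1) (m + 1) + pvR mat (k + 1) (k + 1) := by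
      intro k hk
      simp only [Finset.mem_range] at hk
      have h := sum_pvT_interior mat (k + 1) (by omega) (by omega)
      rw [hm] at h
      simp only [show m + 2 - 1 = m + 1 from rfl] at h
      exact h
    rw [Finset.sum_congr rfl hint]
    ring
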